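-- pv_equiv track=rewrite | github.com/faizfhri/Projek-UAS-Kriptografi | app.py | spiral_decrypt
-- ===== SOURCE A (Python) =====
-- import math
--
-- def spiral_decrypt(input_str):
--     n = int(math.sqrt(len(input_str)))
--     matrix = [[None] * n for _ in range(n)]
--
--     index = 0
--     for i in range(n):
--         for j in range(n):
--             matrix[i][j] = input_str[index]
--             index += 1
--
--     result = ""
--     top, bottom, left, right = 0, n - 1, 0, n - 1
--
--     while top <= bottom and left <= right:
--         for i in range(left, right + 1):
--             result += matrix[top][i]
--         top += 1
--
--         for i in range(top, bottom + 1):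
--             result += matrix[i][right]
--         right -= 1
--
--         if top <= bottom:
--             for i in range(right, left - 1, -1):
--                 result += matrix[bottom][i]
--             bottom -= 1
--
--         if left <= right:
--             for i in range(bottom, top - 1, -1):
--                 result += matrix[i][left]
--             left += 1
--
--     return result
-- ===== SOURCE B (Python) =====
-- import math
--
-- def spiral_decrypt(input_str):
--     # Single clockwise walker over an n x n grid of flat indices (no matrix,
--     # no four-boundary bookkeeping): step straight, turn right when blocked.
--     n = int(math.sqrt(len(input_str)))
--     seen = set()
--     out = []
--     r, c, dr, dc = 0, 0, 0, 1
--     for _ in range(n * n):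
--         out.append(input_str[r * n + c])
--         seen.add((r, c))
--         nr, nc = r + dr, c + dc
--         if not (0 <= nr < n and 0 <= nc < n and (nr, nc) not in seen):
--             dr, dc = dc, -dr
--             nr, nc = r + dr, c + dc
--         r, c = nr, nc
--     return "".join(out)
-- ===== Notes on version B (the rewrite author's own statement) =====
-- stated objective: alternative
-- what changed: Replaces A's matrix construction and four-boundary (top/bottom/left/right) while-loop by a single clockwise walker over flat string indices that keeps a visited set and turns right whenever the next cell is off-grid or already seen.
import Mathlib
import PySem

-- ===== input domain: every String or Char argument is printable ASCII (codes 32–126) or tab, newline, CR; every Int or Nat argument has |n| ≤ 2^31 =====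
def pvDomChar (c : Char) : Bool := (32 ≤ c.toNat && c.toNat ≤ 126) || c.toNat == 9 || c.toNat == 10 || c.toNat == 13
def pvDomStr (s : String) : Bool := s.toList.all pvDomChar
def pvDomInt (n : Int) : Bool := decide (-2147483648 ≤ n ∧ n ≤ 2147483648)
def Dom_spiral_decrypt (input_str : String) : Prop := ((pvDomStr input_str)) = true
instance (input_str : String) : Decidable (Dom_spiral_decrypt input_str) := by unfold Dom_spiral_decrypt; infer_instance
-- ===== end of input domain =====

-- B replaces A's matrix build plus four-boundary while-loop by a single clockwise
-- walker over flat indices with a visited set (alternative formulation, same cost).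

-- ===== PORT A =====
-- matrix[i][j] = input_str[index] with running index = i*n + j; index < n*n ≤ len(input_str),
-- so Python never raises here and List.getD is exact.
def pvMatrixA (s : List Char) (n : Nat) : List (List Char) :=
  (List.range n).map (fun i => (List.range n).map (fun j => s.getD (i * n + j) ' '))

-- matrix[i][j] for in-range i, j (the only accesses A performs); getD default never read.
def pvCell (mat : List (List Char)) (i j : Int) : Char :=
  ((PySem.List.pyGet? mat i).bind (fun row => PySem.List.pyGet? row j)).getD ' '

-- the while-loop of A, with `result` as the accumulator `acc`; the Nat argument is a fuel
-- bound on the number of iterations (a totality guard only: the caller passes enough fuel,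
-- one layer per iteration, so the 0-case is never reached)
def spiralLoopA (mat : List (List Char)) : Nat → Int → Int → Int → Int → List Char → List Char
  | 0, _top, _bottom, _left, _right, acc => acc
  | fuel + 1, top, bottom, left, right, acc =>
    if top ≤ bottom ∧ left ≤ right then
      let acc1 := acc ++ (PySem.List.pyRange left (right + 1) 1).map (fun i => pvCell mat top i)
      let acc2 := acc1 ++ (PySem.List.pyRange (top + 1) (bottom + 1) 1).map (fun i => pvCell mat i right)
      let acc3 := if top + 1 ≤ bottom then
          acc2 ++ (PySem.List.pyRange (right - 1) (left - 1) (-1)).map (fun i => pvCell mat bottom i)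
        else acc2
      let bottom1 := if top + 1 ≤ bottom then bottom - 1 else bottom
      let acc4 := if left ≤ right - 1 then
          acc3 ++ (PySem.List.pyRange bottom1 top (-1)).map (fun i => pvCell mat i left)
        else acc3
      let left1 := if left ≤ right - 1 then left + 1 else left
      spiralLoopA mat fuel (top + 1) bottom1 left1 (right - 1) acc4
    else acc

-- int(math.sqrt(len(input_str))) = Nat.sqrt on every feasible length (float sqrt is exact there)
def spiral_decrypt (input_str : String) : String :=
  let s := input_str.toList
  let n := Nat.sqrt s.length
  String.ofList (spiralLoopA (pvMatrixA s n) n 0 ((n : Int) - 1) 0 ((n : Int) - 1) [])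

-- ===== PORT B =====
-- input_str[r*n+c]: the walker only visits grid cells, so the index is in range and the default never read.
def pvGetc (s : List Char) (i : Int) : Char := (PySem.List.pyGet? s i).getD ' '

-- the for-loop of B: state (r, c, dr, dc, seen, out), one recursive step per iteration;
-- the guard is `0 <= nr < n and 0 <= nc < n and (nr, nc) not in seen`
def pvWalk (s : List Char) (n : Int) :
    Nat → Int → Int → Int → Int → PySem.Set (Int × Int) → List Char → List Char
  | 0, _r, _c, _dr, _dc, _seen, out => out
  | j + 1, r, c, dr, dc, seen, out =>
    if 0 ≤ r + dr ∧ r + dr < n ∧ 0 ≤ c + dc ∧ c + dc < n ∧ (r + dr, c + dc) ∉ PySem.Set.add seen (r, c) then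
      pvWalk s n j (r + dr) (c + dc) dr dc (PySem.Set.add seen (r, c)) (out ++ [pvGetc s (r * n + c)])
    else
      pvWalk s n j (r + dc) (c - dr) dc (-dr) (PySem.Set.add seen (r, c)) (out ++ [pvGetc s (r * n + c)])

def spiral_decrypt_alt (input_str : String) : String :=
  let s := input_str.toList
  let n := Nat.sqrt s.length
  String.ofList (pvWalk s (n : Int) (n * n) 0 0 0 1 PySem.Set.empty [])

-- ===== PRECONDITION & SPEC =====
def Spec_spiral_decrypt (input_str : String) (out : String) : Prop := out = spiral_decrypt_alt input_str
instance (input_str : String) (out : String) : Decidable (Spec_spiral_decrypt input_str out) := by unfold Spec_spiral_decrypt; infer_instance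

-- ===== CLAIM (what is proved, stated in full; the proofs are below) =====
def Claim_equal_spiral_decrypt : Prop := ∀ (input_str : String), Dom_spiral_decrypt input_str → Spec_spiral_decrypt input_str (spiral_decrypt input_str)

-- ===== LEMMAS AND PROOFS =====

-- the walker's step guard, as a predicate on a cell
def pvOk (n : Int) (seen : PySem.Set (Int × Int)) (x y : Int) : Prop :=
  0 ≤ x ∧ x < n ∧ 0 ≤ y ∧ y < n ∧ (x, y) ∉ seen

-- the spiral by layers: the common normal form both ports are reduced to
def specB (s : List Char) (n : Int) : Nat → Int → Int → List Char
  | 0, _, _ => []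
  | 1, t, l => [pvGetc s (t * n + l)]
  | m + 2, t, l =>
    (List.range (m + 2)).map (fun (i : Nat) => pvGetc s (t * n + (l + (i : Int))))
    ++ (List.range (m + 1)).map (fun (i : Nat) => pvGetc s ((t + 1 + (i : Int)) * n + (l + (m : Int) + 1)))
    ++ (List.range (m + 1)).map (fun (i : Nat) => pvGetc s ((t + (m : Int) + 1) * n + (l + (m : Int) - (i : Int))))
    ++ (List.range m).map (fun (i : Nat) => pvGetc s ((t + (m : Int) - (i : Int)) * n + l))
    ++ specB s n m (t + 1) (l + 1)

lemma pvWalk_succ (s : List Char) (n : Int) (j : Nat) (r c dr dc : Int)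
    (S : PySem.Set (Int × Int)) (out : List Char) :
    pvWalk s n (j + 1) r c dr dc S out =
      if 0 ≤ r + dr ∧ r + dr < n ∧ 0 ≤ c + dc ∧ c + dc < n ∧ (r + dr, c + dc) ∉ PySem.Set.add S (r, c) then
        pvWalk s n j (r + dr) (c + dc) dr dc (PySem.Set.add S (r, c)) (out ++ [pvGetc s (r * n + c)])
      else
        pvWalk s n j (r + dc) (c - dr) dc (-dr) (PySem.Set.add S (r, c)) (out ++ [pvGetc s (r * n + c)]) := rfl

lemma pvWalk_append (s : List Char) (n : Int) :
    ∀ (j : Nat) (r c dr dc : Int) (S : PySem.Set (Int × Int)) (out : List Char),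
    pvWalk s n j r c dr dc S out = out ++ pvWalk s n j r c dr dc S [] := by
  intro j
  induction j with
  | zero => intro r c dr dc S out; simp [pvWalk]
  | succ j ih =>
    intro r c dr dc S out
    simp only [pvWalk]
    split
    · rw [ih _ _ _ _ _ (out ++ _), ih _ _ _ _ _ ([] ++ _)]; simp
    · rw [ih _ _ _ _ _ (out ++ _), ih _ _ _ _ _ ([] ++ _)]; simp

lemma pvWalk_run (s : List Char) (n dr dc : Int)
    (hdir : (dr = 0 ∧ dc = 1) ∨ (dr = 1 ∧ dc = 0) ∨ (dr = 0 ∧ dc = -1) ∨ (dr = -1 ∧ dc = 0)) :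
    ∀ (k j : Nat) (r c : Int) (S : PySem.Set (Int × Int)),
    (∀ i : Nat, i ≤ k → pvOk n S (r + (i : Int) * dr) (c + (i : Int) * dc)) →
    ¬ pvOk n S (r + ((k : Int) + 1) * dr) (c + ((k : Int) + 1) * dc) →
    pvWalk s n (k + 1 + j) r c dr dc S []
      = (List.range (k + 1)).map (fun (i : Nat) => pvGetc s ((r + (i : Int) * dr) * n + (c + (i : Int) * dc)))
        ++ pvWalk s n j (r + (k : Int) * dr + dc) (c + (k : Int) * dc - dr) dc (-dr)
             ((List.range (k + 1)).foldl (fun (S' : PySem.Set (Int × Int)) (i : Nat) => PySem.Set.add S' (r + (i : Int) * dr, c + (i : Int) * dc)) S) [] := by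
  intro k
  induction k with
  | zero =>
    intro j r c S H1 H2
    rw [show 0 + 1 + j = j + 1 from by omega, pvWalk_succ]
    rw [if_neg]
    · rw [pvWalk_append]
      simp only [List.range_succ, List.range_zero, List.nil_append, List.map_cons, List.map_nil,
        List.foldl_cons, List.foldl_nil, Nat.cast_zero, zero_mul, add_zero]
    · intro hok
      apply H2
      simp only [Nat.cast_zero, zero_add, one_mul]
      obtain ⟨h1, h2, h3, h4, h5⟩ := hok
      exact ⟨h1, h2, h3, h4, fun hm => h5 ((PySem.Set.mem_add _ _ _).2 (Or.inl hm))⟩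
  | succ k ih =>
    intro j r c S H1 H2
    rw [show k + 1 + 1 + j = (j + k + 1) + 1 from by omega, pvWalk_succ]
    rw [if_pos]
    · rw [pvWalk_append, show j + k + 1 = k + 1 + j from by omega,
          ih j (r + dr) (c + dc) (PySem.Set.add S (r, c)) ?h1 ?h2]
      case h1 =>
        intro i hi
        obtain ⟨h1, h2, h3, h4, h5⟩ := H1 (i + 1) (by omega)
        push_cast at h1 h2 h3 h4 h5 ⊢
        refine ⟨by linarith, by linarith, by linarith, by linarith, ?_⟩
        rw [PySem.Set.mem_add]
        rintro (hm | hm)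
        · exact h5 (by convert hm using 2 <;> ring)
        · rcases hdir with ⟨e1, e2⟩ | ⟨e1, e2⟩ | ⟨e1, e2⟩ | ⟨e1, e2⟩ <;>
            (subst e1; subst e2; simp only [Prod.mk.injEq] at hm; omega)
      case h2 =>
        intro hok
        apply H2
        obtain ⟨h1, h2, h3, h4, h5⟩ := hok
        push_cast at h1 h2 h3 h4 h5 ⊢
        refine ⟨by linarith, by linarith, by linarith, by linarith, ?_⟩
        intro hm
        exact h5 (by rw [PySem.Set.mem_add]; left; convert hm using 2 <;> ring)
      · conv_rhs => rw [show List.range (k + 1 + 1) = 0 :: List.map Nat.succ (List.range (k + 1)) from List.range_succ_eq_map]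
        rw [List.map_cons, List.map_map, List.foldl_cons]
        simp only [Nat.cast_zero, zero_mul, add_zero]
        have hmap : ((List.range (k + 1)).map ((fun (i : Nat) => pvGetc s ((r + (i:Int) * dr) * n + (c + (i:Int) * dc))) ∘ Nat.succ))
            = (List.range (k + 1)).map (fun (i : Nat) => pvGetc s ((r + dr + (i:Int) * dr) * n + (c + dc + (i:Int) * dc))) := by
          apply List.map_congr_left
          intro i _
          simp only [Function.comp_apply]
          congr 2 <;> push_cast <;> ring
        have hfold2 : ((List.range (k + 1)).map Nat.succ).foldl
              (fun (S' : PySem.Set (Int × Int)) (i : Nat) => PySem.Set.add S' (r + (i:Int) * dr, c + (i:Int) * dc)) (PySem.Set.add S (r, c))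
            = (List.range (k + 1)).foldl (fun (S' : PySem.Set (Int × Int)) (i : Nat) => PySem.Set.add S' (r + dr + (i:Int) * dr, c + dc + (i:Int) * dc)) (PySem.Set.add S (r, c)) := by
          rw [List.foldl_map]
          congr 1
          funext S' i
          congr 2
          · push_cast; ring
          · push_cast; ring
        rw [hmap, hfold2]
        have hpos1 : r + dr + (k:Int) * dr + dc = r + ((k + 1 : Nat) : Int) * dr + dc := by push_cast; ring
        have hpos2 : c + dc + (k:Int) * dc - dr = c + ((k + 1 : Nat) : Int) * dc - dr := by push_cast; ring
        rw [← hpos1, ← hpos2]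
        simp
    · obtain ⟨h1, h2, h3, h4, h5⟩ := H1 1 (by omega)
      push_cast at h1 h2 h3 h4 h5
      refine ⟨by linarith, by linarith, by linarith, by linarith, ?_⟩
      rw [PySem.Set.mem_add]
      rintro (hm | hm)
      · exact h5 (by convert hm using 2 <;> ring)
      · rcases hdir with ⟨e1, e2⟩ | ⟨e1, e2⟩ | ⟨e1, e2⟩ | ⟨e1, e2⟩ <;>
          (subst e1; subst e2; simp only [Prod.mk.injEq] at hm; omega)

lemma pvWalk_congr (s : List Char) (n : Int) (j : Nat) {r r' c c' dr dr' dc dc' : Int}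
    {S S' : PySem.Set (Int × Int)} (h1 : r = r') (h2 : c = c') (h3 : dr = dr') (h4 : dc = dc')
    (h5 : S = S') : pvWalk s n j r c dr dc S [] = pvWalk s n j r' c' dr' dc' S' [] := by
  subst_vars; rfl

lemma walk_spec (s : List Char) (n : Int) :
    ∀ (m : Nat) (t l : Int) (S : PySem.Set (Int × Int)),
    (∀ x y : Int, pvOk n S x y ↔ (t ≤ x ∧ x ≤ t + (m : Int) - 1 ∧ l ≤ y ∧ y ≤ l + (m : Int) - 1)) →
    pvWalk s n (m * m) t l 0 1 S [] = specB s n m t l := by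
  intro m
  induction m using Nat.strong_induction_on with
  | _ m ih =>
    match m with
    | 0 => intro t l S _; rfl
    | 1 =>
      intro t l S _
      rw [show 1 * 1 = 0 + 1 from rfl, pvWalk_succ]
      split <;> simp [pvWalk, specB]
    | (m + 2) =>
      intro t l S H
      -- run 1: along the top row, heading right
      have e1 : pvWalk s n ((m + 2) * (m + 2)) t l 0 1 S []
          = (List.range (m + 2)).map (fun (i : Nat) => pvGetc s (t * n + (l + (i : Int))))
            ++ pvWalk s n ((m + 2) * (m + 1)) (t + 1) (l + (m : Int) + 1) 1 0
                 ((List.range (m + 2)).foldl (fun (S' : PySem.Set (Int × Int)) (i : Nat) => PySem.Set.add S' (t, l + (i : Int))) S) [] := by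
        rw [show (m + 2) * (m + 2) = (m + 1) + 1 + ((m + 2) * (m + 1)) from by ring]
        rw [pvWalk_run s n 0 1 (by tauto) (m + 1) ((m + 2) * (m + 1)) t l S ?ha1 ?ha2]
        case ha1 =>
          intro i hi
          simp only [mul_zero, add_zero, mul_one]
          exact (H t (l + (i : Int))).2 (by push_cast; omega)
        case ha2 =>
          simp only [mul_zero, add_zero, mul_one]
          rw [H]
          push_cast
          omega
        congr 1
        · apply List.map_congr_left; intro i _; congr 1; push_cast; ring
        · apply pvWalk_congr
          · push_cast; ring
          · push_cast; ring
          · rfl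
          · rfl
          · congr 1; funext S' i; congr 1; rw [Prod.mk.injEq]
            exact ⟨by push_cast; ring, by push_cast; ring⟩
      -- the cells of run 1, as a set
      have hM1 : ∀ x y : Int,
          (x, y) ∈ (List.range (m + 2)).foldl (fun (S' : PySem.Set (Int × Int)) (i : Nat) => PySem.Set.add S' (t, l + (i : Int))) S
          ↔ (x, y) ∈ S ∨ (x = t ∧ l ≤ y ∧ y < l + (m : Int) + 2) := by
        intro x y
        rw [PySem.Set.mem_foldl_add]
        simp only [List.mem_range, Prod.mk.injEq]
        constructor
        · rintro (h | ⟨i, hi, rfl, rfl⟩)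
          · exact Or.inl h
          · exact Or.inr ⟨rfl, by omega, by omega⟩
        · rintro (h | ⟨rfl, h2, h3⟩)
          · exact Or.inl h
          · exact Or.inr ⟨(y - l).toNat, by omega, rfl, by omega⟩
      -- run 2: down the right column
      have e2 : pvWalk s n ((m + 2) * (m + 1)) (t + 1) (l + (m : Int) + 1) 1 0
            ((List.range (m + 2)).foldl (fun (S' : PySem.Set (Int × Int)) (i : Nat) => PySem.Set.add S' (t, l + (i : Int))) S) []
          = (List.range (m + 1)).map (fun (i : Nat) => pvGetc s ((t + 1 + (i : Int)) * n + (l + (m : Int) + 1)))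
            ++ pvWalk s n ((m + 1) * (m + 1)) (t + (m : Int) + 1) (l + (m : Int)) 0 (-1)
                 ((List.range (m + 1)).foldl (fun (S' : PySem.Set (Int × Int)) (i : Nat) => PySem.Set.add S' (t + 1 + (i : Int), l + (m : Int) + 1))
                   ((List.range (m + 2)).foldl (fun (S' : PySem.Set (Int × Int)) (i : Nat) => PySem.Set.add S' (t, l + (i : Int))) S)) [] := by
        rw [show (m + 2) * (m + 1) = m + 1 + ((m + 1) * (m + 1)) from by ring]
        rw [pvWalk_run s n 1 0 (by tauto) m ((m + 1) * (m + 1)) (t + 1) (l + (m : Int) + 1) _ ?hb1 ?hb2]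
        case hb1 =>
          intro i hi
          simp only [mul_one, mul_zero, add_zero]
          obtain ⟨g1, g2, g3, g4, hns⟩ := (H (t + 1 + (i : Int)) (l + (m : Int) + 1)).2 (by push_cast; omega)
          refine ⟨g1, g2, g3, g4, fun hmem => ?_⟩
          rcases (hM1 _ _).1 hmem with h | h
          · exact hns h
          · omega
        case hb2 =>
          simp only [mul_one, mul_zero, add_zero]
          rintro ⟨g1, g2, g3, g4, hns⟩
          have hr := (H _ _).1 ⟨g1, g2, g3, g4, fun hm => hns ((hM1 _ _).2 (Or.inl hm))⟩
          push_cast at hr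
          omega
        congr 1
        · apply List.map_congr_left; intro i _; congr 1; push_cast; ring
        · apply pvWalk_congr
          · push_cast; ring
          · push_cast; ring
          · rfl
          · rfl
          · congr 1; funext S' i; congr 1; rw [Prod.mk.injEq]
            exact ⟨by push_cast; ring, by push_cast; ring⟩
      have hM2 : ∀ x y : Int, (x, y) ∈ ((List.range (m + 1)).foldl (fun (S' : PySem.Set (Int × Int)) (i : Nat) => PySem.Set.add S' (t + 1 + (i : Int), l + (m : Int) + 1)) ((List.range (m + 2)).foldl (fun (S' : PySem.Set (Int × Int)) (i : Nat) => PySem.Set.add S' (t, l + (i : Int))) S))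
          ↔ (x, y) ∈ ((List.range (m + 2)).foldl (fun (S' : PySem.Set (Int × Int)) (i : Nat) => PySem.Set.add S' (t, l + (i : Int))) S) ∨ (y = l + (m : Int) + 1 ∧ t + 1 ≤ x ∧ x < t + (m : Int) + 2) := by
        intro x y
        rw [PySem.Set.mem_foldl_add]
        simp only [List.mem_range, Prod.mk.injEq]
        constructor
        · rintro (h | ⟨i, hi, rfl, rfl⟩)
          · exact Or.inl h
          · exact Or.inr ⟨rfl, by omega, by omega⟩
        · rintro (h | ⟨rfl, h2, h3⟩)
          · exact Or.inl h
          · exact Or.inr ⟨(x - (t + 1)).toNat, by omega, by omega, rfl⟩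
      -- run 3: along the bottom row, heading left
      have e3 : pvWalk s n ((m + 1) * (m + 1)) (t + (m : Int) + 1) (l + (m : Int)) 0 (-1) ((List.range (m + 1)).foldl (fun (S' : PySem.Set (Int × Int)) (i : Nat) => PySem.Set.add S' (t + 1 + (i : Int), l + (m : Int) + 1)) ((List.range (m + 2)).foldl (fun (S' : PySem.Set (Int × Int)) (i : Nat) => PySem.Set.add S' (t, l + (i : Int))) S)) []
          = (List.range (m + 1)).map (fun (i : Nat) => pvGetc s ((t + (m : Int) + 1) * n + (l + (m : Int) - (i : Int))))
            ++ pvWalk s n ((m + 1) * m) (t + (m : Int)) l (-1) 0 ((List.range (m + 1)).foldl (fun (S' : PySem.Set (Int × Int)) (i : Nat) => PySem.Set.add S' (t + (m : Int) + 1, l + (m : Int) - (i : Int))) ((List.range (m + 1)).foldl (fun (S' : PySem.Set (Int × Int)) (i : Nat) => PySem.Set.add S' (t + 1 + (i : Int), l + (m : Int) + 1)) ((List.range (m + 2)).foldl (fun (S' : PySem.Set (Int × Int)) (i : Nat) => PySem.Set.add S' (t, l + (i : Int))) S))) [] := by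
        rw [show (m + 1) * (m + 1) = m + 1 + ((m + 1) * m) from by ring]
        rw [pvWalk_run s n 0 (-1) (by tauto) m ((m + 1) * m) (t + (m : Int) + 1) (l + (m : Int)) _ ?hc1 ?hc2]
        case hc1 =>
          intro i hi
          simp only [mul_zero, add_zero, mul_neg_one, ← sub_eq_add_neg]
          obtain ⟨g1, g2, g3, g4, hns⟩ := (H (t + (m : Int) + 1) (l + (m : Int) - (i : Int))).2 (by push_cast; omega)
          refine ⟨g1, g2, g3, g4, fun hmem => ?_⟩
          rcases (hM2 _ _).1 hmem with h | h
          · rcases (hM1 _ _).1 h with h' | h'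
            · exact hns h'
            · omega
          · omega
        case hc2 =>
          simp only [mul_zero, add_zero, mul_neg_one, ← sub_eq_add_neg]
          rintro ⟨g1, g2, g3, g4, hns⟩
          have hr := (H _ _).1 ⟨g1, g2, g3, g4,
            fun hm => hns ((hM2 _ _).2 (Or.inl ((hM1 _ _).2 (Or.inl hm))))⟩
          push_cast at hr
          omega
        congr 1
        · apply List.map_congr_left; intro i _; congr 1; push_cast; ring
        · apply pvWalk_congr
          · push_cast; ring
          · push_cast; ring
          · rfl
          · norm_num
          · congr 1; funext S' i; congr 1; rw [Prod.mk.injEq]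
            exact ⟨by push_cast; ring, by push_cast; ring⟩
      have hM3 : ∀ x y : Int, (x, y) ∈ ((List.range (m + 1)).foldl (fun (S' : PySem.Set (Int × Int)) (i : Nat) => PySem.Set.add S' (t + (m : Int) + 1, l + (m : Int) - (i : Int))) ((List.range (m + 1)).foldl (fun (S' : PySem.Set (Int × Int)) (i : Nat) => PySem.Set.add S' (t + 1 + (i : Int), l + (m : Int) + 1)) ((List.range (m + 2)).foldl (fun (S' : PySem.Set (Int × Int)) (i : Nat) => PySem.Set.add S' (t, l + (i : Int))) S)))
          ↔ (x, y) ∈ ((List.range (m + 1)).foldl (fun (S' : PySem.Set (Int × Int)) (i : Nat) => PySem.Set.add S' (t + 1 + (i : Int), l + (m : Int) + 1)) ((List.range (m + 2)).foldl (fun (S' : PySem.Set (Int × Int)) (i : Nat) => PySem.Set.add S' (t, l + (i : Int))) S)) ∨ (x = t + (m : Int) + 1 ∧ l ≤ y ∧ y ≤ l + (m : Int)) := by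
        intro x y
        rw [PySem.Set.mem_foldl_add]
        simp only [List.mem_range, Prod.mk.injEq]
        constructor
        · rintro (h | ⟨i, hi, rfl, rfl⟩)
          · exact Or.inl h
          · exact Or.inr ⟨rfl, by omega, by omega⟩
        · rintro (h | ⟨rfl, h2, h3⟩)
          · exact Or.inl h
          · exact Or.inr ⟨(l + (m : Int) - y).toNat, by omega, rfl, by omega⟩
      rcases m with _ | m'
      · -- 2 × 2 layer: the three runs already exhaust all four cells
        rw [e1, e2, e3]
        norm_num [specB, pvWalk, List.append_assoc]
      · -- run 4: up the left column, then the inner spiral by induction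
        have e4 : pvWalk s n ((m' + 1 + 1) * (m' + 1)) (t + ((m' + 1 : Nat) : Int)) l (-1) 0 ((List.range (m' + 1 + 1)).foldl (fun (S' : PySem.Set (Int × Int)) (i : Nat) => PySem.Set.add S' (t + ((m' + 1 : Nat) : Int) + 1, l + ((m' + 1 : Nat) : Int) - (i : Int))) ((List.range (m' + 1 + 1)).foldl (fun (S' : PySem.Set (Int × Int)) (i : Nat) => PySem.Set.add S' (t + 1 + (i : Int), l + ((m' + 1 : Nat) : Int) + 1)) ((List.range (m' + 1 + 2)).foldl (fun (S' : PySem.Set (Int × Int)) (i : Nat) => PySem.Set.add S' (t, l + (i : Int))) S))) []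
            = (List.range (m' + 1)).map (fun (i : Nat) => pvGetc s ((t + ((m' + 1 : Nat) : Int) - (i : Int)) * n + l))
              ++ pvWalk s n ((m' + 1) * (m' + 1)) (t + 1) (l + 1) 0 1 ((List.range (m' + 1)).foldl (fun (S' : PySem.Set (Int × Int)) (i : Nat) => PySem.Set.add S' (t + ((m' + 1 : Nat) : Int) - (i : Int), l)) ((List.range (m' + 1 + 1)).foldl (fun (S' : PySem.Set (Int × Int)) (i : Nat) => PySem.Set.add S' (t + ((m' + 1 : Nat) : Int) + 1, l + ((m' + 1 : Nat) : Int) - (i : Int))) ((List.range (m' + 1 + 1)).foldl (fun (S' : PySem.Set (Int × Int)) (i : Nat) => PySem.Set.add S' (t + 1 + (i : Int), l + ((m' + 1 : Nat) : Int) + 1)) ((List.range (m' + 1 + 2)).foldl (fun (S' : PySem.Set (Int × Int)) (i : Nat) => PySem.Set.add S' (t, l + (i : Int))) S)))) [] := by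
          rw [show (m' + 1 + 1) * (m' + 1) = m' + 1 + ((m' + 1) * (m' + 1)) from by ring]
          rw [pvWalk_run s n (-1) 0 (by tauto) m' ((m' + 1) * (m' + 1)) (t + ((m' + 1 : Nat) : Int)) l _ ?hd1 ?hd2]
          case hd1 =>
            intro i hi
            simp only [mul_neg_one, ← sub_eq_add_neg, mul_zero, add_zero]
            obtain ⟨g1, g2, g3, g4, hns⟩ :=
              (H (t + ((m' + 1 : Nat) : Int) - (i : Int)) l).2 (by push_cast; omega)
            refine ⟨g1, g2, g3, g4, fun hmem => ?_⟩
            rcases (hM3 _ _).1 hmem with h | h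
            · rcases (hM2 _ _).1 h with h' | h'
              · rcases (hM1 _ _).1 h' with h'' | h''
                · exact hns h''
                · push_cast at h''; omega
              · push_cast at h'; omega
            · push_cast at h; omega
          case hd2 =>
            simp only [mul_neg_one, ← sub_eq_add_neg, mul_zero, add_zero]
            rintro ⟨g1, g2, g3, g4, hns⟩
            apply hns
            have hx : t + ((m' + 1 : Nat) : Int) - ((m' : Int) + 1) = t := by push_cast; ring
            rw [hx]
            exact (hM3 _ _).2 (Or.inl ((hM2 _ _).2 (Or.inl ((hM1 _ _).2 (Or.inr ⟨rfl, by omega, by push_cast; omega⟩)))))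
          congr 1
          · apply List.map_congr_left; intro i _; congr 1; push_cast; ring
          · apply pvWalk_congr
            · push_cast; ring
            · push_cast; ring
            · rfl
            · norm_num
            · congr 1; funext S' i; congr 1; rw [Prod.mk.injEq]
              exact ⟨by push_cast; ring, by push_cast; ring⟩
        have hM4 : ∀ x y : Int, (x, y) ∈ ((List.range (m' + 1)).foldl (fun (S' : PySem.Set (Int × Int)) (i : Nat) => PySem.Set.add S' (t + ((m' + 1 : Nat) : Int) - (i : Int), l)) ((List.range (m' + 1 + 1)).foldl (fun (S' : PySem.Set (Int × Int)) (i : Nat) => PySem.Set.add S' (t + ((m' + 1 : Nat) : Int) + 1, l + ((m' + 1 : Nat) : Int) - (i : Int))) ((List.range (m' + 1 + 1)).foldl (fun (S' : PySem.Set (Int × Int)) (i : Nat) => PySem.Set.add S' (t + 1 + (i : Int), l + ((m' + 1 : Nat) : Int) + 1)) ((List.range (m' + 1 + 2)).foldl (fun (S' : PySem.Set (Int × Int)) (i : Nat) => PySem.Set.add S' (t, l + (i : Int))) S))))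
            ↔ (x, y) ∈ ((List.range (m' + 1 + 1)).foldl (fun (S' : PySem.Set (Int × Int)) (i : Nat) => PySem.Set.add S' (t + ((m' + 1 : Nat) : Int) + 1, l + ((m' + 1 : Nat) : Int) - (i : Int))) ((List.range (m' + 1 + 1)).foldl (fun (S' : PySem.Set (Int × Int)) (i : Nat) => PySem.Set.add S' (t + 1 + (i : Int), l + ((m' + 1 : Nat) : Int) + 1)) ((List.range (m' + 1 + 2)).foldl (fun (S' : PySem.Set (Int × Int)) (i : Nat) => PySem.Set.add S' (t, l + (i : Int))) S))) ∨ (y = l ∧ t + 1 ≤ x ∧ x ≤ t + ((m' + 1 : Nat) : Int)) := by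
          intro x y
          rw [PySem.Set.mem_foldl_add]
          simp only [List.mem_range, Prod.mk.injEq]
          constructor
          · rintro (h | ⟨i, hi, rfl, rfl⟩)
            · exact Or.inl h
            · exact Or.inr ⟨rfl, by push_cast; omega, by push_cast; omega⟩
          · rintro (h | ⟨rfl, h2, h3⟩)
            · exact Or.inl h
            · exact Or.inr ⟨(t + ((m' + 1 : Nat) : Int) - x).toNat, by push_cast; omega, by push_cast; omega, rfl⟩
        have Hin : ∀ x y : Int, pvOk n ((List.range (m' + 1)).foldl (fun (S' : PySem.Set (Int × Int)) (i : Nat) => PySem.Set.add S' (t + ((m' + 1 : Nat) : Int) - (i : Int), l)) ((List.range (m' + 1 + 1)).foldl (fun (S' : PySem.Set (Int × Int)) (i : Nat) => PySem.Set.add S' (t + ((m' + 1 : Nat) : Int) + 1, l + ((m' + 1 : Nat) : Int) - (i : Int))) ((List.range (m' + 1 + 1)).foldl (fun (S' : PySem.Set (Int × Int)) (i : Nat) => PySem.Set.add S' (t + 1 + (i : Int), l + ((m' + 1 : Nat) : Int) + 1)) ((List.range (m' + 1 + 2)).foldl (fun (S' : PySem.Set (Int × Int)) (i : Nat) => PySem.Set.add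 S' (t, l + (i : Int))) S)))) x y ↔
            (t + 1 ≤ x ∧ x ≤ t + 1 + ((m' + 1 : Nat) : Int) - 1 ∧ l + 1 ≤ y ∧ y ≤ l + 1 + ((m' + 1 : Nat) : Int) - 1) := by
          intro x y
          constructor
          · rintro ⟨g1, g2, g3, g4, hns⟩
            have hb0 : (x, y) ∉ S := fun hm => hns ((hM4 _ _).2 (Or.inl ((hM3 _ _).2 (Or.inl ((hM2 _ _).2 (Or.inl ((hM1 _ _).2 (Or.inl hm))))))))
            have hrect := (H x y).1 ⟨g1, g2, g3, g4, hb0⟩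
            have hb1 : ¬(x = t ∧ l ≤ y ∧ y < l + ((m' + 1 : Nat) : Int) + 2) :=
              fun h => hns ((hM4 _ _).2 (Or.inl ((hM3 _ _).2 (Or.inl ((hM2 _ _).2 (Or.inl ((hM1 _ _).2 (Or.inr h))))))))
            have hb2 : ¬(y = l + ((m' + 1 : Nat) : Int) + 1 ∧ t + 1 ≤ x ∧ x < t + ((m' + 1 : Nat) : Int) + 2) :=
              fun h => hns ((hM4 _ _).2 (Or.inl ((hM3 _ _).2 (Or.inl ((hM2 _ _).2 (Or.inr h))))))
            have hb3 : ¬(x = t + ((m' + 1 : Nat) : Int) + 1 ∧ l ≤ y ∧ y ≤ l + ((m' + 1 : Nat) : Int)) :=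
              fun h => hns ((hM4 _ _).2 (Or.inl ((hM3 _ _).2 (Or.inr h))))
            have hb4 : ¬(y = l ∧ t + 1 ≤ x ∧ x ≤ t + ((m' + 1 : Nat) : Int)) :=
              fun h => hns ((hM4 _ _).2 (Or.inr h))
            push_cast at hrect hb1 hb2 hb3 hb4 ⊢
            omega
          · intro hin
            obtain ⟨g1, g2, g3, g4, hns⟩ := (H x y).2 (by push_cast at hin ⊢; omega)
            refine ⟨g1, g2, g3, g4, fun hmem => ?_⟩
            rcases (hM4 _ _).1 hmem with h | h
            · rcases (hM3 _ _).1 h with h' | h'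
              · rcases (hM2 _ _).1 h' with h'' | h''
                · rcases (hM1 _ _).1 h'' with h3 | h3
                  · exact hns h3
                  · push_cast at hin h3; omega
                · push_cast at hin h''; omega
              · push_cast at hin h'; omega
            · push_cast at hin h; omega
        rw [e1, e2, e3, e4, ih (m' + 1) (by omega) (t + 1) (l + 1) _ Hin]
        simp [specB, List.append_assoc]

lemma cell_eq (s : List Char) (nn : Nat) (hlen : nn * nn ≤ s.length) (i j : Int)
    (hi : 0 ≤ i) (hi' : i < (nn : Int)) (hj : 0 ≤ j) (hj' : j < (nn : Int)) :
    pvCell (pvMatrixA s nn) i j = pvGetc s (i * (nn : Int) + j) := by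
  unfold pvCell pvMatrixA pvGetc
  rw [PySem.List.pyGet?_of_nonneg _ hi,
      PySem.List.pyGet?_of_nonneg s (show (0:Int) ≤ i * (nn:Int) + j by positivity)]
  have hilt : i.toNat < nn := by omega
  have hjlt : j.toNat < nn := by omega
  have hidx : (i * (nn:Int) + j).toNat = i.toNat * nn + j.toNat := by
    have h1 : i * (nn:Int) = (i.toNat : Int) * (nn : Int) := by congr 1; omega
    rw [h1]; omega
  rw [hidx]
  have hlt : i.toNat * nn + j.toNat < s.length := by
    calc i.toNat * nn + j.toNat < i.toNat * nn + nn := by omega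
    _ = (i.toNat + 1) * nn := by ring
    _ ≤ nn * nn := Nat.mul_le_mul_right _ (by omega)
    _ ≤ s.length := hlen
  rw [List.getElem?_map, List.getElem?_range hilt]
  simp only [Option.map_some, Option.bind_some]
  rw [PySem.List.pyGet?_of_nonneg _ hj, List.getElem?_map, List.getElem?_range hjlt]
  simp only [Option.map_some, Option.getD_some]
  rw [List.getD_eq_getElem?_getD, List.getElem?_eq_getElem hlt]

lemma A_spec (s : List Char) (nn : Nat) (hlen : nn * nn ≤ s.length) :
    ∀ (m : Nat) (fuel : Nat) (t l : Int) (acc : List Char), m ≤ 2 * fuel → 0 ≤ t → 0 ≤ l →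
    t + (m : Int) ≤ (nn : Int) → l + (m : Int) ≤ (nn : Int) →
    spiralLoopA (pvMatrixA s nn) fuel t (t + (m : Int) - 1) l (l + (m : Int) - 1) acc
      = acc ++ specB s (nn : Int) m t l := by
  intro m
  induction m using Nat.strong_induction_on with
  | _ m ih =>
    match m with
    | 0 =>
      intro fuel t l acc hf h0t h0l htn hln
      match fuel with
      | 0 => simp [spiralLoopA, specB]
      | fuel + 1 =>
        rw [spiralLoopA, if_neg (by push_cast; omega)]
        simp [specB]
    | 1 =>
      intro fuel t l acc hf h0t h0l htn hln
      match fuel with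
      | fuel + 1 =>
        rw [spiralLoopA, if_pos ⟨by push_cast; omega, by push_cast; omega⟩]
        simp only []
        have c1 : ¬ (t + 1 ≤ t + ((1 : Nat) : Int) - 1) := by push_cast; omega
        have c2 : ¬ (l ≤ l + ((1 : Nat) : Int) - 1 - 1) := by push_cast; omega
        simp only [if_neg c1, if_neg c2]
        have hrec : ∀ f : Nat, spiralLoopA (pvMatrixA s nn) f (t + 1) (t + ((1 : Nat) : Int) - 1) l
            (l + ((1 : Nat) : Int) - 1 - 1)
            (acc ++ List.map (fun i => pvCell (pvMatrixA s nn) t i) (PySem.List.pyRange l (l + ((1 : Nat) : Int) - 1 + 1) 1) ++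
              List.map (fun i => pvCell (pvMatrixA s nn) i (l + ((1 : Nat) : Int) - 1)) (PySem.List.pyRange (t + 1) (t + ((1 : Nat) : Int) - 1 + 1) 1))
            = acc ++ List.map (fun i => pvCell (pvMatrixA s nn) t i) (PySem.List.pyRange l (l + ((1 : Nat) : Int) - 1 + 1) 1) ++
              List.map (fun i => pvCell (pvMatrixA s nn) i (l + ((1 : Nat) : Int) - 1)) (PySem.List.pyRange (t + 1) (t + ((1 : Nat) : Int) - 1 + 1) 1) := by
          intro f
          match f with
          | 0 => rw [spiralLoopA]
          | f + 1 => rw [spiralLoopA, if_neg (by push_cast; omega)]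
        rw [hrec]
        rw [show l + ((1 : Nat) : Int) - 1 + 1 = l + 1 from by push_cast; ring,
            PySem.List.pyRange_one_singleton,
            show t + ((1 : Nat) : Int) - 1 + 1 = t + 1 from by push_cast; ring,
            PySem.List.pyRange_one_eq_nil (le_refl _)]
        simp [specB, cell_eq s nn hlen t l h0t (by push_cast; omega) h0l (by push_cast; omega)]
    | (m + 2) =>
      intro fuel t l acc hf h0t h0l htn hln
      match fuel with
      | fuel + 1 =>
      rw [spiralLoopA, if_pos ⟨by push_cast; omega, by push_cast; omega⟩]
      simp only []
      have c1 : t + 1 ≤ t + ((m + 2 : Nat) : Int) - 1 := by push_cast; omega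
      have c2 : l ≤ l + ((m + 2 : Nat) : Int) - 1 - 1 := by push_cast; omega
      simp only [if_pos c1, if_pos c2]
      have hs1 : List.map (fun i => pvCell (pvMatrixA s nn) t i)
            (PySem.List.pyRange l (l + ((m + 2 : Nat) : Int) - 1 + 1) 1)
          = (List.range (m + 2)).map (fun (i : Nat) => pvGetc s (t * (nn : Int) + (l + (i : Int)))) := by
        rw [PySem.List.pyRange_one, List.map_map,
            show ((l + ((m + 2 : Nat) : Int) - 1 + 1) - l).toNat = m + 2 from by omega]
        apply List.map_congr_left
        intro k hk
        rw [List.mem_range] at hk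
        simp only [Function.comp_apply]
        rw [cell_eq s nn hlen t (l + (k : Int)) h0t (by push_cast; omega) (by omega) (by push_cast; omega)]
      have hs2 : List.map (fun i => pvCell (pvMatrixA s nn) i (l + ((m + 2 : Nat) : Int) - 1))
            (PySem.List.pyRange (t + 1) (t + ((m + 2 : Nat) : Int) - 1 + 1) 1)
          = (List.range (m + 1)).map (fun (i : Nat) => pvGetc s ((t + 1 + (i : Int)) * (nn : Int) + (l + (m : Int) + 1))) := by
        rw [PySem.List.pyRange_one, List.map_map,
            show ((t + ((m + 2 : Nat) : Int) - 1 + 1) - (t + 1)).toNat = m + 1 from by omega]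
        apply List.map_congr_left
        intro k hk
        rw [List.mem_range] at hk
        simp only [Function.comp_apply]
        rw [cell_eq s nn hlen (t + 1 + (k : Int)) (l + ((m + 2 : Nat) : Int) - 1)
              (by omega) (by push_cast; omega) (by push_cast; omega) (by push_cast; omega)]
        congr 1
        push_cast
        ring
      have hs3 : List.map (fun i => pvCell (pvMatrixA s nn) (t + ((m + 2 : Nat) : Int) - 1) i)
            (PySem.List.pyRange (l + ((m + 2 : Nat) : Int) - 1 - 1) (l - 1) (-1))
          = (List.range (m + 1)).map (fun (i : Nat) => pvGetc s ((t + (m : Int) + 1) * (nn : Int) + (l + (m : Int) - (i : Int)))) := by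
        rw [PySem.List.pyRange_neg_one, List.map_map,
            show ((l + ((m + 2 : Nat) : Int) - 1 - 1) - (l - 1)).toNat = m + 1 from by omega]
        apply List.map_congr_left
        intro k hk
        rw [List.mem_range] at hk
        simp only [Function.comp_apply]
        rw [cell_eq s nn hlen (t + ((m + 2 : Nat) : Int) - 1) (l + ((m + 2 : Nat) : Int) - 1 - 1 - (k : Int))
              (by push_cast; omega) (by push_cast; omega) (by push_cast; omega) (by push_cast; omega)]
        congr 1
        push_cast
        ring
      have hs4 : List.map (fun i => pvCell (pvMatrixA s nn) i l)
            (PySem.List.pyRange (t + ((m + 2 : Nat) : Int) - 1 - 1) t (-1))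
          = (List.range m).map (fun (i : Nat) => pvGetc s ((t + (m : Int) - (i : Int)) * (nn : Int) + l)) := by
        rw [PySem.List.pyRange_neg_one, List.map_map,
            show ((t + ((m + 2 : Nat) : Int) - 1 - 1) - t).toNat = m from by omega]
        apply List.map_congr_left
        intro k hk
        rw [List.mem_range] at hk
        simp only [Function.comp_apply]
        rw [cell_eq s nn hlen (t + ((m + 2 : Nat) : Int) - 1 - 1 - (k : Int)) l
              (by push_cast; omega) (by push_cast; omega) h0l (by push_cast; omega)]
        congr 1
        push_cast
        ring
      rw [hs1, hs2, hs3, hs4]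
      rw [show t + ((m + 2 : Nat) : Int) - 1 - 1 = (t + 1) + (m : Int) - 1 from by push_cast; ring,
          show l + ((m + 2 : Nat) : Int) - 1 - 1 = (l + 1) + (m : Int) - 1 from by push_cast; ring]
      rw [ih m (by omega) fuel (t + 1) (l + 1) _ (by omega) (by omega) (by omega) (by push_cast; omega) (by push_cast; omega)]
      simp only [specB]
      simp [List.append_assoc]

-- ===== VERDICT (by name: the statement is the Claim_ definition above) =====
theorem spiral_decrypt_spec : Claim_equal_spiral_decrypt := by
  unfold Claim_equal_spiral_decrypt Spec_spiral_decrypt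
  intro input_str _
  unfold spiral_decrypt spiral_decrypt_alt
  simp only []
  congr 1
  have hlen : Nat.sqrt input_str.toList.length * Nat.sqrt input_str.toList.length ≤ input_str.toList.length :=
    by simpa [Nat.pow_two] using Nat.sqrt_le' input_str.toList.length
  rw [show ((Nat.sqrt input_str.toList.length : Int)) - 1 = 0 + (Nat.sqrt input_str.toList.length : Int) - 1 from by ring]
  rw [A_spec input_str.toList (Nat.sqrt input_str.toList.length) hlen
        (Nat.sqrt input_str.toList.length) (Nat.sqrt input_str.toList.length) 0 0 [] (by omega)
        le_rfl le_rfl (by omega) (by omega)]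
  rw [walk_spec input_str.toList (Nat.sqrt input_str.toList.length : Int)
        (Nat.sqrt input_str.toList.length) 0 0 PySem.Set.empty ?hr]
  case hr =>
    intro x y
    simp only [pvOk, PySem.Set.empty, List.not_mem_nil, not_false_iff, and_true]
    omega
  simp
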